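-- pv_equiv track=rewrite | github.com/magenta1223/boj-archive | problems/15685번： 드래곤 커브/15685번： 드래곤 커브.py | dragon_curve
-- ===== SOURCE A (Python) =====
-- def dragon_curve(curve, directions):
--     """
--     커브의 각 좌표와 방향 list를 받는다.
--     끝점부터 역으로 그려나가면 됨
--     이전 방향을 90도 반시계방향으로 회전
--     """
--     next_directions = []
--     for i in range(len(directions)):
--         x, y = curve[-1]
--         dx, dy = directions[-i-1]
--         curve.append((x+dy, y-dx))
--         next_directions.append((dy, -dx))
--     return curve, directions + next_directions
-- ===== SOURCE B (Python) =====
-- def dragon_curve(curve, directions):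
--     # Prefix-sum-table algorithm: build the forward prefix sums P of the ORIGINAL
--     # directions once; by linearity of the 90-degree rotation, each new point and
--     # each new direction is then an independent pointwise formula over that table
--     # (new point k = pivot + rot(total) - rot(P[n-k]); new direction = rot of the
--     # difference of adjacent reversed prefix sums). No backward walk, no running
--     # accumulation of new points. Mutates `curve` in place exactly as A does.
--     prefix = [(0, 0)]
--     for dx, dy in directions:
--         px, py = prefix[-1]
--         prefix.append((px + dx, py + dy))
--     rev = prefix[::-1]
--     next_directions = [(b[1] - a[1], a[0] - b[0]) for a, b in zip(rev[1:], rev[:-1])]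
--     if directions:
--         x, y = curve[-1]
--         tx, ty = prefix[-1]
--         curve.extend((x + ty - py, y - tx + px) for px, py in rev[1:])
--     return curve, directions + next_directions
-- ===== Notes on version B (the rewrite author's own statement) =====
-- stated objective: alternative
-- what changed: Replaces A's backward fused walk (repeatedly re-reading curve[-1] and directions[-i-1] while accumulating new points one by one) by a forward prefix-sum table of the original directions, from which every new point and every new direction is computed by an independent pointwise formula, using linearity of the 90-degree rotation (new point k = pivot + rot(total) - rot(prefix[n-k]); new direction = rot of the difference of adjacent reversed prefix sums).
import Mathlib
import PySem

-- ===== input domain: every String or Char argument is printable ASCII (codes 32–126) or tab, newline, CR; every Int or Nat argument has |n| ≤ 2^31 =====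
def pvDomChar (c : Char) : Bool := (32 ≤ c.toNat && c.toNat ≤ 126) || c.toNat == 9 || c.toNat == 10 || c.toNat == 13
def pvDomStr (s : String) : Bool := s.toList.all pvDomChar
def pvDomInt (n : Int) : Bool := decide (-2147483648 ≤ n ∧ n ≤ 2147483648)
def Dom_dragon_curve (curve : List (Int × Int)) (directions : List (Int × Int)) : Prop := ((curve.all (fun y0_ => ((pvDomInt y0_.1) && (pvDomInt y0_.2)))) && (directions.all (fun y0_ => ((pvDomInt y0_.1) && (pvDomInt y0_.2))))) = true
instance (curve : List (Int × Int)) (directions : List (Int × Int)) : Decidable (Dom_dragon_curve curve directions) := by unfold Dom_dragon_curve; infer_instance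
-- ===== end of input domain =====

-- B replaces A's backward fused walk by a forward prefix-sum table of the original directions,
-- from which each new point and new direction is an independent pointwise formula (rotation is
-- linear); same O(n) cost, different algorithm. Both A and B mutate `curve` in place identically
-- in Python; the proof is about the returned value.


-- ===== PORT A =====
-- one loop iteration of A: read curve[-1] and directions[-i-1], append rotated step
def pvStepA (directions : List (Int × Int)) (s : List (Int × Int) × List (Int × Int)) (i : Int) : List (Int × Int) × List (Int × Int) :=
  let xy := PySem.List.pyGetD s.1 (-1) ((0 : Int), (0 : Int))
  let dd := PySem.List.pyGetD directions (-i - 1) ((0 : Int), (0 : Int))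
  (s.1 ++ [(xy.1 + dd.2, xy.2 - dd.1)], s.2 ++ [(dd.2, -dd.1)])

def dragon_curve (curve : List (Int × Int)) (directions : List (Int × Int)) : (List (Int × Int)) × (List (Int × Int)) :=
  let st := (PySem.List.pyRange 0 directions.length 1).foldl (pvStepA directions) (curve, ([] : List (Int × Int)))
  (st.1, directions ++ st.2)

-- ===== PORT B =====
-- one iteration of B's first pass: append prefix[-1] + d to the prefix table
def pvStepP (acc : List (Int × Int)) (d : Int × Int) : List (Int × Int) :=
  let p := PySem.List.pyGetD acc (-1) ((0 : Int), (0 : Int))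
  acc ++ [(p.1 + d.1, p.2 + d.2)]

def dragon_curve_alt (curve : List (Int × Int)) (directions : List (Int × Int)) : (List (Int × Int)) × (List (Int × Int)) :=
  let pre := directions.foldl pvStepP [((0 : Int), (0 : Int))]
  let rev := (PySem.List.slice? pre none none (-1)).getD []      -- pre[::-1]; step -1 never raises
  let nds := ((PySem.List.slice rev (some 1) none).zip (PySem.List.slice rev none (some (-1)))).map
      (fun ab => (ab.2.2 - ab.1.2, ab.1.1 - ab.2.1))
  let c :=
    if directions = [] then curve
    else
      let xy := PySem.List.pyGetD curve (-1) ((0 : Int), (0 : Int))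
      let t := PySem.List.pyGetD pre (-1) ((0 : Int), (0 : Int))
      curve ++ (PySem.List.slice rev (some 1) none).map (fun q => (xy.1 + t.2 - q.2, xy.2 - t.1 + q.1))
  (c, directions ++ nds)

-- ===== PRECONDITION & SPEC =====
-- Pre_ excludes exactly the inputs where Python A raises IndexError: an empty curve with a
-- nonempty direction list (curve[-1] fails); B raises there too.
def Pre_dragon_curve (curve : List (Int × Int)) (directions : List (Int × Int)) : Prop :=
  directions ≠ [] → curve ≠ []
instance (curve : List (Int × Int)) (directions : List (Int × Int)) : Decidable (Pre_dragon_curve curve directions) := by unfold Pre_dragon_curve; infer_instance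

def pvWitness_dragon_curve : (List (Int × Int)) × (List (Int × Int)) := ([((0 : Int), (0 : Int))], [((1 : Int), (0 : Int))])

def Spec_dragon_curve (curve : List (Int × Int)) (directions : List (Int × Int)) (out : (List (Int × Int)) × (List (Int × Int))) : Prop := out = dragon_curve_alt curve directions
instance (curve : List (Int × Int)) (directions : List (Int × Int)) (out : (List (Int × Int)) × (List (Int × Int))) : Decidable (Spec_dragon_curve curve directions out) := by unfold Spec_dragon_curve; infer_instance

-- ===== CLAIM (what is proved, stated in full; the proofs are below) =====
def Claim_equal_dragon_curve : Prop := ∀ (curve : List (Int × Int)) (directions : List (Int × Int)), Dom_dragon_curve curve directions → Pre_dragon_curve curve directions → Spec_dragon_curve curve directions (dragon_curve curve directions)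

-- ===== LEMMAS AND PROOFS =====
def pvRot (d : Int × Int) : Int × Int := (d.2, -d.1)

def pvScan (p : Int × Int) : List (Int × Int) → List (Int × Int)
  | [] => []
  | d :: t => (p.1 + d.1, p.2 + d.2) :: pvScan (p.1 + d.1, p.2 + d.2) t

def pvLast (p : Int × Int) : List (Int × Int) → (Int × Int)
  | [] => p
  | d :: t => pvLast (p.1 + d.1, p.2 + d.2) t

-- the prefix table B builds, as a pure value
def pvTab (ds : List (Int × Int)) : List (Int × Int) := ((0 : Int), (0 : Int)) :: pvScan ((0 : Int), (0 : Int)) ds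

theorem pvScan_append_singleton (l : List (Int × Int)) (p d : Int × Int) :
    pvScan p (l ++ [d]) = pvScan p l ++ [((pvLast p l).1 + d.1, (pvLast p l).2 + d.2)] := by
  induction l generalizing p with
  | nil => simp [pvScan, pvLast]
  | cons h t ih => simp [pvScan, pvLast, ih]

theorem pvGetLast_append_pvScan (l : List (Int × Int)) (c : List (Int × Int)) (p : Int × Int)
    (hc : c.getLast? = some p) : (c ++ pvScan p l).getLast? = some (pvLast p l) := by
  induction l generalizing c p with
  | nil => simpa [pvScan, pvLast] using hc
  | cons d t ih =>
      have : c ++ pvScan p (d :: t) = (c ++ [(p.1 + d.1, p.2 + d.2)]) ++ pvScan (p.1 + d.1, p.2 + d.2) t := by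
        simp [pvScan]
      rw [this, ih _ _ (by simp)]
      simp [pvLast]

theorem pvGetD_neg_one_of_getLast? (xs : List (Int × Int)) (v d : Int × Int)
    (h : xs.getLast? = some v) : PySem.List.pyGetD xs (-1) d = v := by
  have hne : xs ≠ [] := by
    intro heq; rw [heq] at h; simp at h
  rw [PySem.List.pyGetD_neg_one xs d hne]
  rw [List.getLast?_eq_some_getLast hne] at h
  exact (Option.some.injEq _ _).mp h

theorem pvFoldA (directions : List (Int × Int)) (n : Nat) (hn : n ≤ directions.length)
    (c : List (Int × Int)) (p : Int × Int) (hc : c.getLast? = some p) (nd0 : List (Int × Int)) :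
    (List.range n).foldl (fun s (k : Nat) => pvStepA directions s ((0 : Int) + k)) (c, nd0)
      = (c ++ pvScan p ((directions.reverse.take n).map pvRot),
         nd0 ++ (directions.reverse.take n).map pvRot) := by
  induction n with
  | zero => simp [pvScan]
  | succ n ih =>
      have hn' : n < directions.length := by omega
      have hrev : n < directions.reverse.length := by simpa using hn'
      rw [List.range_succ, List.foldl_append]
      rw [ih (by omega)]
      have htake : directions.reverse.take (n + 1)
          = directions.reverse.take n ++ [directions.reverse[n]] := by
        rw [List.take_add_one]
        simp [List.getElem?_eq_getElem hrev]
      set rots := (directions.reverse.take n).map pvRot with hrots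
      have hlast : (c ++ pvScan p rots).getLast? = some (pvLast p rots) :=
        pvGetLast_append_pvScan rots c p hc
      simp only [List.foldl_cons, List.foldl_nil]
      show pvStepA directions (c ++ pvScan p rots, nd0 ++ rots) ((0 : Int) + n) = _
      unfold pvStepA
      rw [pvGetD_neg_one_of_getLast? _ _ _ hlast]
      have hidx : -((0 : Int) + (n : Int)) - 1 = -(((n + 1 : Nat) : Int)) := by push_cast; ring
      rw [hidx, PySem.List.pyGetD_neg_natCast directions _ _ (by omega) (by omega)]
      have hget : directions[directions.length - (n + 1)] = directions.reverse[n] := by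
        rw [List.getElem_reverse]
        congr 1
        omega
      rw [hget]
      rw [htake]
      simp only [List.map_append, List.map_cons, List.map_nil, ← hrots]
      rw [pvScan_append_singleton]
      simp [pvRot, sub_eq_add_neg]

-- B's first pass builds exactly the prefix table pvTab
theorem pvFoldP (l : List (Int × Int)) (acc : List (Int × Int)) (p : Int × Int)
    (hc : acc.getLast? = some p) : l.foldl pvStepP acc = acc ++ pvScan p l := by
  induction l generalizing acc p with
  | nil => simp [pvScan]
  | cons d t ih =>
      simp only [List.foldl_cons, pvStepP, pvGetD_neg_one_of_getLast? _ _ _ hc]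
      rw [ih (acc ++ [(p.1 + d.1, p.2 + d.2)]) (p.1 + d.1, p.2 + d.2) (by simp)]
      simp [pvScan]

theorem pvScan_shift (l : List (Int × Int)) (q d : Int × Int) :
    pvScan (d.1 + q.1, d.2 + q.2) l = (pvScan q l).map (fun v => (d.1 + v.1, d.2 + v.2)) := by
  induction l generalizing q with
  | nil => simp [pvScan]
  | cons h t ih =>
      simp only [pvScan, List.map_cons]
      rw [show d.1 + q.1 + h.1 = d.1 + (q.1 + h.1) from by ring,
          show d.2 + q.2 + h.2 = d.2 + (q.2 + h.2) from by ring]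
      exact congrArg (List.cons _) (ih (q.1 + h.1, q.2 + h.2))

theorem pvTab_cons (d : Int × Int) (ds : List (Int × Int)) :
    pvTab (d :: ds) = ((0 : Int), (0 : Int)) :: (pvTab ds).map (fun v => (d.1 + v.1, d.2 + v.2)) := by
  have h := pvScan_shift ds ((0 : Int), (0 : Int)) d
  simp at h
  simp [pvTab, pvScan, h]

theorem pvLast_eq_add_sum (l : List (Int × Int)) (p : Int × Int) :
    pvLast p l = (p.1 + (l.map Prod.fst).sum, p.2 + (l.map Prod.snd).sum) := by
  induction l generalizing p with
  | nil => simp [pvLast]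
  | cons d t ih => simp [pvLast, ih]; constructor <;> ring

theorem pvTab_getLast? (ds : List (Int × Int)) :
    (pvTab ds).getLast? = some (pvLast ((0 : Int), (0 : Int)) ds) :=
  pvGetLast_append_pvScan ds [((0 : Int), (0 : Int))] _ (by simp)

theorem pvSum_neg (t : List (Int × Int)) :
    (t.map (fun x => -x.1)).sum = -((t.map Prod.fst).sum) := by
  induction t with
  | nil => simp
  | cons h l ih => simp [ih]; ring

theorem pvRevTail_map (g : Int × Int → Int × Int) (l : List (Int × Int)) :
    (l.map g).reverse.tail = (l.reverse.tail).map g := by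
  rw [← List.map_reverse, ← List.map_tail]

theorem pvRevDropLast_map (g : Int × Int → Int × Int) (l : List (Int × Int)) :
    (l.map g).reverse.dropLast = (l.reverse.dropLast).map g := by
  rw [← List.map_reverse, ← List.map_dropLast]

-- B's points formula over the reversed table equals A's cumulative walk of rotated reversed steps
theorem pvPts (ds : List (Int × Int)) (x y : Int) :
    ((pvTab ds).reverse.tail).map
        (fun q => (x + (pvLast ((0:Int),(0:Int)) ds).2 - q.2, y - (pvLast ((0:Int),(0:Int)) ds).1 + q.1))
      = pvScan (x, y) (ds.reverse.map pvRot) := by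
  induction ds generalizing x y with
  | nil => simp [pvTab, pvScan]
  | cons d t ih =>
      rw [pvTab_cons]
      have hM : ((pvTab t).map (fun v => (d.1 + v.1, d.2 + v.2))).reverse ≠ [] := by
        simp [pvTab]
      rw [List.reverse_cons, List.tail_append_of_ne_nil hM]
      rw [List.map_append]
      have hT : pvLast ((0:Int),(0:Int)) (d :: t)
          = (d.1 + (pvLast ((0:Int),(0:Int)) t).1, d.2 + (pvLast ((0:Int),(0:Int)) t).2) := by
        rw [pvLast_eq_add_sum, pvLast_eq_add_sum]
        simp
      rw [hT]
      have hcomp :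
          (((pvTab t).map (fun v => (d.1 + v.1, d.2 + v.2))).reverse.tail).map
            (fun q => (x + (d.2 + (pvLast ((0:Int),(0:Int)) t).2) - q.2,
                       y - (d.1 + (pvLast ((0:Int),(0:Int)) t).1) + q.1))
          = ((pvTab t).reverse.tail).map
            (fun q => (x + (pvLast ((0:Int),(0:Int)) t).2 - q.2,
                       y - (pvLast ((0:Int),(0:Int)) t).1 + q.1)) := by
        rw [pvRevTail_map, List.map_map]
        congr 1
        funext q
        simp only [Function.comp_apply, Prod.mk.injEq]
        constructor <;> ring
      rw [hcomp, ih]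
      rw [List.reverse_cons, List.map_append]
      simp only [List.map_cons, List.map_nil]
      rw [pvScan_append_singleton]
      congr 1
      have hlast : pvLast (x, y) (t.reverse.map pvRot)
          = (x + (pvLast ((0:Int),(0:Int)) t).2, y - (pvLast ((0:Int),(0:Int)) t).1) := by
        rw [pvLast_eq_add_sum, pvLast_eq_add_sum]
        have h1 : ((t.reverse.map pvRot).map Prod.fst).sum = (t.map Prod.snd).sum := by
          simp [pvRot, List.map_map, Function.comp_def, List.sum_reverse]
        have h2 : ((t.reverse.map pvRot).map Prod.snd).sum = -((t.map Prod.fst).sum) := by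
          simp only [List.map_map, List.map_reverse, List.sum_reverse, Function.comp_def, pvRot]
          exact pvSum_neg t
        rw [h1, h2]
        simp only [Prod.mk.injEq]
        constructor <;> ring
      rw [hlast]
      simp only [pvRot, List.cons.injEq, Prod.mk.injEq, and_true]
      constructor <;> ring

-- B's zip formula over the reversed table equals the rotated reversed step list
theorem pvNds (ds : List (Int × Int)) :
    (((pvTab ds).reverse.tail).zip ((pvTab ds).reverse.dropLast)).map
        (fun ab => (ab.2.2 - ab.1.2, ab.1.1 - ab.2.1))
      = ds.reverse.map pvRot := by
  induction ds with
  | nil => simp [pvTab, pvScan]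
  | cons d t ih =>
      rw [pvTab_cons]
      have hM : ((pvTab t).map (fun v => (d.1 + v.1, d.2 + v.2))).reverse ≠ [] := by
        simp [pvTab]
      rw [List.reverse_cons, List.tail_append_of_ne_nil hM, List.dropLast_concat]
      set M := ((pvTab t).map (fun v => (d.1 + v.1, d.2 + v.2))).reverse with hMdef
      have htail : M.tail = ((pvTab t).reverse.tail).map (fun v => (d.1 + v.1, d.2 + v.2)) := by
        rw [hMdef, pvRevTail_map]
      have hdrop : M.dropLast = ((pvTab t).reverse.dropLast).map (fun v => (d.1 + v.1, d.2 + v.2)) := by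
        rw [hMdef, pvRevDropLast_map]
      have hgl? : M.getLast? = some ((d.1 : Int), (d.2 : Int)) := by
        rw [hMdef, List.getLast?_reverse]
        simp [pvTab]
      have hgl : M.getLast hM = (d.1, d.2) := by
        have h := List.getLast?_eq_some_getLast hM
        rw [h] at hgl?
        exact (Option.some.injEq _ _).mp hgl?
      have hMsplit : M = M.dropLast ++ [M.getLast hM] := (List.dropLast_concat_getLast hM).symm
      have hlen : (((pvTab t).reverse.tail).map (fun v => (d.1 + v.1, d.2 + v.2))).length
          = M.dropLast.length := by
        simp [hMdef, pvTab]
      rw [htail]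
      rw [hMsplit]
      rw [List.zip_append hlen, List.map_append]
      rw [hdrop, List.zip_map, List.map_map]
      have hfun : ((fun ab : (Int × Int) × (Int × Int) => (ab.2.2 - ab.1.2, ab.1.1 - ab.2.1)) ∘
          Prod.map (fun v : Int × Int => (d.1 + v.1, d.2 + v.2)) (fun v : Int × Int => (d.1 + v.1, d.2 + v.2)))
          = fun ab : (Int × Int) × (Int × Int) => (ab.2.2 - ab.1.2, ab.1.1 - ab.2.1) := by
        funext ab
        simp only [Function.comp_apply, Prod.map, Prod.mk.injEq]
        constructor <;> ring
      rw [hfun, ih, List.reverse_cons, List.map_append]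
      congr 1
      simp [hgl, pvRot]

-- ===== VERDICT (by name: the statement is the Claim_ definition above) =====
theorem dragon_curve_spec : Claim_equal_dragon_curve := by
  intro curve directions _ hpre
  unfold Spec_dragon_curve dragon_curve dragon_curve_alt
  by_cases hd : directions = []
  · subst hd
    simp [PySem.List.pyRange_one_eq_nil, PySem.List.slice?_none_none_neg_one,
      PySem.List.slice_from_one, PySem.List.slice_to_neg_one]
  · have hc : curve ≠ [] := hpre hd
    obtain ⟨p, hp⟩ : ∃ p, curve.getLast? = some p := by
      cases h : curve.getLast? with
      | none => exact absurd (List.getLast?_eq_none_iff.mp h) hc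
      | some v => exact ⟨v, rfl⟩
    have hrange : PySem.List.pyRange 0 (directions.length : Int) 1
        = (List.range directions.length).map (fun k : Nat => (0 : Int) + k) := by
      rw [PySem.List.pyRange_one]
      simp
    rw [hrange, List.foldl_map]
    rw [pvFoldA directions directions.length (le_refl _) curve p hp []]
    dsimp only
    have htk : directions.reverse.take directions.length = directions.reverse :=
      List.take_of_length_le (by simp)
    rw [htk]
    -- B side
    rw [pvFoldP directions [((0:Int),(0:Int))] ((0:Int),(0:Int)) (by simp)]
    rw [show [((0:Int),(0:Int))] ++ pvScan ((0:Int),(0:Int)) directions = pvTab directions from rfl]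
    rw [PySem.List.slice?_none_none_neg_one]
    simp only [Option.getD_some]
    rw [PySem.List.slice_from_one, PySem.List.slice_to_neg_one]
    rw [if_neg hd]
    rw [pvGetD_neg_one_of_getLast? _ _ _ hp,
        pvGetD_neg_one_of_getLast? _ _ _ (pvTab_getLast? directions)]
    rw [pvPts, pvNds]
    simp
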